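-- pv_equiv track=rewrite | github.com/tbvanderwoude/icts-m | main.py | enumerate_matchings
-- ===== SOURCE A (Python) =====
-- from copy import copy, deepcopy
--
-- def enumerate_matchings(agents, tasks):
--     if agents:
--         (name, type), *tail = agents
--         results = []
--         for (i, (task_name, task_type)) in enumerate(tasks):
--             if type == task_type:
--                 tasks_cp = copy(tasks)
--                 tasks_cp.pop(i)
--                 if tail:
--                     results.extend(map(lambda rs: [(name, task_name)] + rs, enumerate_matchings(tail, tasks_cp)))
--                 else:
--                     results.append([(name, task_name)])
--         return results
--     else:
--         return []
-- ===== SOURCE B (Python) =====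
-- def enumerate_matchings(agents, tasks):
--     if not agents:
--         return []
--     # worklist of partial states: (matching built so far, tasks still available)
--     states = [([], tasks)]
--     for (name, type) in agents:
--         new_states = []
--         for (matching, remaining) in states:
--             for (i, (task_name, task_type)) in enumerate(remaining):
--                 if type == task_type:
--                     new_states.append((matching + [(name, task_name)],
--                                        remaining[:i] + remaining[i + 1:]))
--         states = new_states
--     return [matching for (matching, _) in states]
-- ===== Notes on version B (the rewrite author's own statement) =====
-- stated objective: alternative
-- what changed: Replaces the per-agent recursion (with its extend-of-mapped-recursive-results and separate last-agent base case) by an iterative breadth-first worklist: a single loop over agents expands a list of partial states (matching, remaining tasks), and the matchings are projected out at the end.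
import Mathlib
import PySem

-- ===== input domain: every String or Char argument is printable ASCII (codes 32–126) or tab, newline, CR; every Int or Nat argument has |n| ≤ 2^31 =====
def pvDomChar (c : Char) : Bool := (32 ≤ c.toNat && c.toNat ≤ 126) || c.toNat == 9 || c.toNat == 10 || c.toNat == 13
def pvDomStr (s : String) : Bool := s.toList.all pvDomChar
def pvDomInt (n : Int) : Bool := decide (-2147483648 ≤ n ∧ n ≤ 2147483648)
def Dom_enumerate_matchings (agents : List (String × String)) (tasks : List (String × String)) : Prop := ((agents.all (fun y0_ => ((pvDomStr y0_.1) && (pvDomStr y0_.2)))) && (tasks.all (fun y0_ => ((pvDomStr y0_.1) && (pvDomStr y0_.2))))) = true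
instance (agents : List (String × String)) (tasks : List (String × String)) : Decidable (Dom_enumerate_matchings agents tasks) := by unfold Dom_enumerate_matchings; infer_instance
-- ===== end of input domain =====

-- B replaces A's recursion over agents by an iterative worklist of partial states (same output, same order).


-- ===== PORT A =====
-- inner 'for (i, (task_name, task_type)) in enumerate(tasks)' loop of A; 'recur' is the
-- recursive call 'enumerate_matchings(tail, ·)'.  'tasks_cp = copy(tasks); tasks_cp.pop(i)'
-- is ported as eraseIdx i.toNat, exact because enumerate indices are 0 ≤ i < len(tasks).
-- 'results' is a Python list built by append/extend: kept as an Array (O(1) amortized push,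
-- like Python's append); 'results.extend(map(f, rec))' is the element-by-element fold of pushes.
def emInnerA (recur : List (String × String) → List (List (String × String)))
    (name ty : String) (tail : List (String × String)) (tasks : List (String × String)) :
    List (Int × (String × String)) → Array (List (String × String)) → Array (List (String × String))
  | [], results => results
  | (i, (task_name, task_type)) :: rest, results =>
      emInnerA recur name ty tail tasks rest
        (if ty == task_type then
          (let tasks_cp := tasks.eraseIdx i.toNat
           if tail ≠ [] then
             (recur tasks_cp).foldl (fun acc rs => acc.push ((name, task_name) :: rs)) results
           else
             results.push [(name, task_name)])
         else results)

def enumerate_matchings : List (String × String) → List (String × String) → List (List (String × String))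
  | [], _ => []
  | (name, ty) :: tail, tasks =>
      (emInnerA (enumerate_matchings tail) name ty tail tasks (PySem.List.enumerate tasks) #[]).toList

-- ===== PORT B =====
-- one pass of the worklist expansion: for each state, for each matching remaining task,
-- append the extended state ('remaining[:i] + remaining[i+1:]' drops task i).
-- 'new_states' is a Python list built by append: kept as an Array (O(1) amortized push)
def embStep (ag : String × String)
    (states : List (List (String × String) × List (String × String))) :
    List (List (String × String) × List (String × String)) :=
  (states.foldl (fun ns st =>
    (PySem.List.enumerate st.2).foldl (fun ns2 p =>
      if ag.2 == p.2.2 then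
        ns2.push (st.1 ++ [(ag.1, p.2.1)],
                  PySem.List.slice st.2 none (some p.1) ++ PySem.List.slice st.2 (some (p.1 + 1)) none)
      else ns2) ns) #[]).toList

def enumerate_matchings_alt (agents : List (String × String)) (tasks : List (String × String)) :
    List (List (String × String)) :=
  if agents = [] then []
  else ((agents.foldl (fun states ag => embStep ag states) [([], tasks)]).map (·.1))

-- ===== PRECONDITION & SPEC =====
def Spec_enumerate_matchings (agents : List (String × String)) (tasks : List (String × String)) (out : List (List (String × String))) : Prop := out = enumerate_matchings_alt agents tasks
instance (agents : List (String × String)) (tasks : List (String × String)) (out : List (List (String × String))) : Decidable (Spec_enumerate_matchings agents tasks out) := by unfold Spec_enumerate_matchings; infer_instance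

-- ===== CLAIM (what is proved, stated in full; the proofs are below) =====
def Claim_equal_enumerate_matchings : Prop := ∀ (agents : List (String × String)) (tasks : List (String × String)), Dom_enumerate_matchings agents tasks → Spec_enumerate_matchings agents tasks (enumerate_matchings agents tasks)

-- ===== LEMMAS AND PROOFS =====

theorem pv_foldl_push_if_toList {A B : Type} (l : List A) (p : A → Bool) (f : A → B) (a : Array B) :
    (l.foldl (fun acc x => if p x then acc.push (f x) else acc) a).toList =
      a.toList ++ (l.filter p).map f := by
  induction l generalizing a with
  | nil => simp
  | cons x xs ih =>
      by_cases h : p x <;> simp [h, ih]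

theorem pv_flatMap_singleton {A B : Type} (l : List A) (f : A → B) :
    (l.flatMap fun x => [f x]) = l.map f := by
  induction l with
  | nil => rfl
  | cons x xs ih => simp [ih]

-- normal form of A's inner loop: a flatMap over the matching entries of the enumerate list
theorem emInnerA_eq (recur : List (String × String) → List (List (String × String)))
    (name ty : String) (tail tasks : List (String × String)) :
    ∀ (l : List (Int × (String × String))) (results : Array (List (String × String))),
    (emInnerA recur name ty tail tasks l results).toList =
      results.toList ++ (l.filter (fun p => ty == p.2.2)).flatMap (fun p =>
        if tail ≠ [] then
          (recur (tasks.eraseIdx p.1.toNat)).map (fun rs => (name, p.2.1) :: rs)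
        else [[(name, p.2.1)]]) := by
  intro l
  induction l with
  | nil => intro results; simp [emInnerA]
  | cons p rest ih =>
      intro results
      obtain ⟨i, tn, tt⟩ := p
      simp only [emInnerA, ih]
      by_cases h : ty == tt <;> by_cases ht : tail = [] <;>
        simp [h, ht, List.append_assoc]

-- normal form of one worklist step of B
theorem embStep_eq (ag : String × String)
    (states : List (List (String × String) × List (String × String))) :
    embStep ag states = states.flatMap (fun st =>
      ((PySem.List.enumerate st.2).filter (fun p => ag.2 == p.2.2)).map (fun p =>
        (st.1 ++ [(ag.1, p.2.1)], st.2.eraseIdx p.1.toNat))) := by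
  unfold embStep
  have hout : ∀ (sts : List (List (String × String) × List (String × String)))
      (a : Array (List (String × String) × List (String × String))),
      (sts.foldl (fun ns st =>
        (PySem.List.enumerate st.2).foldl (fun ns2 p =>
          if ag.2 == p.2.2 then
            ns2.push (st.1 ++ [(ag.1, p.2.1)],
                      PySem.List.slice st.2 none (some p.1) ++ PySem.List.slice st.2 (some (p.1 + 1)) none)
          else ns2) ns) a).toList =
      a.toList ++ sts.flatMap (fun st =>
        ((PySem.List.enumerate st.2).filter (fun p => ag.2 == p.2.2)).map (fun p =>
          (st.1 ++ [(ag.1, p.2.1)],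
           PySem.List.slice st.2 none (some p.1) ++ PySem.List.slice st.2 (some (p.1 + 1)) none))) := by
    intro sts
    induction sts with
    | nil => intro a; simp
    | cons st sts ihs =>
        intro a
        rw [List.foldl_cons, ihs, pv_foldl_push_if_toList, List.flatMap_cons, List.append_assoc]
  rw [hout]
  have h : ∀ st : List (String × String) × List (String × String),
      ((PySem.List.enumerate st.2).filter (fun p => ag.2 == p.2.2)).map (fun p =>
        (st.1 ++ [(ag.1, p.2.1)],
         PySem.List.slice st.2 none (some p.1) ++ PySem.List.slice st.2 (some (p.1 + 1)) none)) =
      ((PySem.List.enumerate st.2).filter (fun p => ag.2 == p.2.2)).map (fun p =>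
        (st.1 ++ [(ag.1, p.2.1)], st.2.eraseIdx p.1.toNat)) := by
    intro st
    apply List.map_congr_left
    intro p hp
    have hp' := (List.mem_filter.mp hp).1
    rw [PySem.List.mem_enumerate_iff] at hp'
    obtain ⟨k, hk, rfl⟩ := hp'
    simp only [zero_add]
    have h2 : PySem.List.slice st.2 (some ((k : Int) + 1)) none = st.2.drop (k + 1) := by
      rw [show ((k : Int) + 1) = ((k + 1 : Nat) : Int) by push_cast; ring]
      exact PySem.List.slice_from_natCast st.2 (k + 1)
    rw [PySem.List.slice_to_natCast, h2]
    simp [List.eraseIdx_eq_take_drop_succ]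
  simp only [h, List.nil_append]

-- invariant of the worklist: after consuming a NONEMPTY agents list, the matchings are
-- each state's partial matching followed by every matching A enumerates from its tasks.
theorem foldl_embStep_eq (agents : List (String × String)) (hne : agents ≠ [])
    (states : List (List (String × String) × List (String × String))) :
    (agents.foldl (fun states ag => embStep ag states) states).map (·.1) =
      states.flatMap (fun st => (enumerate_matchings agents st.2).map (fun rs => st.1 ++ rs)) := by
  induction agents generalizing states with
  | nil => exact absurd rfl hne
  | cons a tail ih =>
      obtain ⟨n, ty⟩ := a
      by_cases htail : tail = []
      · subst htail
        simp only [List.foldl_cons, List.foldl_nil]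
        rw [embStep_eq, List.map_flatMap]
        congr 1
        funext st
        rw [List.map_map]
        conv_rhs => rw [show enumerate_matchings [(n, ty)] st.2
            = (emInnerA (enumerate_matchings []) n ty [] st.2 (PySem.List.enumerate st.2) #[]).toList from rfl,
          emInnerA_eq]
        simp only [ne_eq, not_true_eq_false, if_false, List.nil_append,
          pv_flatMap_singleton]
        simp [List.map_map, Function.comp]
      · simp only [List.foldl_cons]
        rw [ih htail (embStep (n, ty) states), embStep_eq, List.flatMap_assoc]
        congr 1
        funext st
        rw [List.flatMap_map]
        conv_rhs => rw [show enumerate_matchings ((n, ty) :: tail) st.2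
            = (emInnerA (enumerate_matchings tail) n ty tail st.2 (PySem.List.enumerate st.2) #[]).toList from rfl,
          emInnerA_eq]
        simp only [htail, ne_eq, not_false_eq_true, if_true, List.nil_append,
          List.map_flatMap]
        congr 1
        funext p
        simp [List.map_map, Function.comp, List.append_assoc]

-- ===== VERDICT (by name: the statement is the Claim_ definition above) =====
theorem enumerate_matchings_spec : Claim_equal_enumerate_matchings := by
  intro agents tasks _
  unfold Spec_enumerate_matchings enumerate_matchings_alt
  cases agents with
  | nil => simp [enumerate_matchings]
  | cons a tail =>
      rw [if_neg (by simp)]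
      rw [foldl_embStep_eq _ (by simp)]
      simp
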